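-- pv_equiv track=rewrite | github.com/okara83/Becoming-a-Data-Scientist | Data Science and Machine Learning/TRAINING-THOROUGH/EXAMPLES/EDABIT/EXPERT/001_100/48_dart_target_score.py | darts_solver
-- ===== SOURCE A (Python) =====
-- def darts_solver(sections, darts, target):
--     p,q=[],[]
--     if darts == 3:
--         for a in sections:
--             for b in sections:
--                 for c in sections:
--                     if (a + b + c)== target:
--                         z=[]
--                         z.append(a)
--                         z.append(b)
--                         z.append(c)
--                         if len(z)>1:
--                             if not (sorted(z) in p): p.append(sorted(z))
--     elif darts == 4:
--         for a in sections:
--             for b in sections: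
--                 for c in sections:
--                     for d in sections:
--                         if (a + b + c + d)== target:
--                             z=[]
--                             z.append(a)
--                             z.append(b)
--                             z.append(c)
--                             z.append(d)
--                             if len(z)>1:
--                                 if not (sorted(z) in p):p.append(sorted(z))
--     for i in p:
--         for j in range(len(i)): i[j]=str(i[j])
--         q.append("-".join(i))
--     return q
-- ===== SOURCE B (Python) =====
-- from itertools import combinations_with_replacement
--
--
-- def darts_solver(sections, darts, target):
--     if darts == 3 or darts == 4:
--         seen = []
--         for combo in combinations_with_replacement(sections, darts):
--             if sum(combo) == target:
--                 key = sorted(combo)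
--                 if key not in seen:
--                     seen.append(key)
--         return ["-".join(map(str, k)) for k in seen]
--     return []
-- ===== Notes on version B (the rewrite author's own statement) =====
-- stated objective: idiomatic
-- what changed: Replaces the full ordered-tuple product (n^3 / n^4 tuples) with direct enumeration of unordered itertools.combinations_with_replacement tuples, still deduplicating by sorted value list (duplicate section values can repeat a combination) in the same first-appearance order.
import Mathlib
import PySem

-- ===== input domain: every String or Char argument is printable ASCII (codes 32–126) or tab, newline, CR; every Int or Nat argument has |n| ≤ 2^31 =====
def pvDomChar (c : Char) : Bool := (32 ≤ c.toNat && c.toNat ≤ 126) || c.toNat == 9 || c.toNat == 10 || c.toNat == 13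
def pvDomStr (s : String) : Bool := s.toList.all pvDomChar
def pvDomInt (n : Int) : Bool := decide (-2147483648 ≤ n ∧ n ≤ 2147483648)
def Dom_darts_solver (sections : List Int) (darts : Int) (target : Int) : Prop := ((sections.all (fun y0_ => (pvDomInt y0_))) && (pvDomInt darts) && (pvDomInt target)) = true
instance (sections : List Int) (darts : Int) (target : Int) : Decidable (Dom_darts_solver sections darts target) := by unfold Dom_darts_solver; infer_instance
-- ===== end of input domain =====

-- B replaces A's full ordered-tuple product with direct enumeration of unordered
-- combinations-with-replacement (itertools order), keeping the sorted-list dedup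
-- and first-appearance order (objective: idiomatic).

-- ===== PORT A =====
-- literal port of A: nested loops over sections collecting deduplicated sorted
-- triples/quadruples into p (first stage), then the output loop over p (second
-- stage; A's in-place str() index loop over each i becomes a map)
def darts_solver_p (sections : List Int) (darts : Int) (target : Int) : List (List Int) :=
  if darts = 3 then
    sections.foldl (fun p a =>
      sections.foldl (fun p b =>
        sections.foldl (fun p c =>
          if a + b + c = target then
            let z : List Int := [a, b, c]
            if z.length > 1 then
              if (PySem.List.sorted z (fun x => x) false) ∈ p then p
              else p ++ [PySem.List.sorted z (fun x => x) false]
            else p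
          else p) p) p) []
  else if darts = 4 then
    sections.foldl (fun p a =>
      sections.foldl (fun p b =>
        sections.foldl (fun p c =>
          sections.foldl (fun p d =>
            if a + b + c + d = target then
              let z : List Int := [a, b, c, d]
              if z.length > 1 then
                if (PySem.List.sorted z (fun x => x) false) ∈ p then p
                else p ++ [PySem.List.sorted z (fun x => x) false]
              else p
            else p) p) p) p) []
  else []

def darts_solver (sections : List Int) (darts : Int) (target : Int) : List String :=
  (darts_solver_p sections darts target).foldl
    (fun q i => q ++ [PySem.Str.join "-" (i.map PySem.Int.toStr)]) []

-- ===== PORT B =====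
-- itertools.combinations_with_replacement(xs, r), as lists, in CPython's order
def pvCwr (r : Nat) (xs : List Int) : List (List Int) :=
  match r, xs with
  | 0, _ => [[]]
  | _ + 1, [] => []
  | r + 1, x :: t => (pvCwr r (x :: t)).map (x :: ·) ++ pvCwr (r + 1) t
termination_by (r, xs.length)

-- B's dedup loop over the generated combinations
def darts_solver_alt_seen (combos : List (List Int)) (target : Int) : List (List Int) :=
  combos.foldl (fun seen combo =>
    if combo.sum = target then
      if (PySem.List.sorted combo (fun x => x) false) ∈ seen then seen
      else seen ++ [PySem.List.sorted combo (fun x => x) false]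
    else seen) []

def darts_solver_alt (sections : List Int) (darts : Int) (target : Int) : List String :=
  if darts = 3 ∨ darts = 4 then
    (darts_solver_alt_seen (if darts = 3 then pvCwr 3 sections else pvCwr 4 sections) target).map
      (fun k => PySem.Str.join "-" (k.map PySem.Int.toStr))
  else []

-- ===== PRECONDITION & SPEC =====
def Spec_darts_solver (sections : List Int) (darts : Int) (target : Int) (out : List String) : Prop := out = darts_solver_alt sections darts target
instance (sections : List Int) (darts : Int) (target : Int) (out : List String) : Decidable (Spec_darts_solver sections darts target out) := by unfold Spec_darts_solver; infer_instance

-- ===== CLAIM (what is proved, stated in full; the proofs are below) =====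
def Claim_equal_darts_solver : Prop := ∀ (sections : List Int) (darts : Int) (target : Int), Dom_darts_solver sections darts target → Spec_darts_solver sections darts target (darts_solver sections darts target)

-- ===== LEMMAS AND PROOFS =====

/-- the key A and B deduplicate by: the sorted value list -/
def keyOf (l : List Int) : List Int := PySem.List.sorted l (fun x => x) false

theorem keyOf_perm {l l' : List Int} (h : l.Perm l') : keyOf l = keyOf l' :=
  (PySem.List.sorted_id_eq_sorted_id_iff_perm l l').mpr h

/-- dedup-keeping-first fold over a list of keys -/
def dd (acc : List (List Int)) (K : List (List Int)) : List (List Int) :=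
  K.foldl (fun p k => if k ∈ p then p else p ++ [k]) acc

theorem dd_nil (acc : List (List Int)) : dd acc [] = acc := rfl

theorem dd_append (acc : List (List Int)) (K1 K2 : List (List Int)) :
    dd acc (K1 ++ K2) = dd (dd acc K1) K2 := List.foldl_append

theorem mem_dd_left {x : List Int} {acc : List (List Int)} (K : List (List Int))
    (h : x ∈ acc) : x ∈ dd acc K := by
  induction K generalizing acc with
  | nil => exact h
  | cons k K ih =>
    simp only [dd, List.foldl_cons] at *
    apply ih
    split
    · exact h
    · exact List.mem_append_left _ h

theorem mem_dd_right {x : List Int} {K : List (List Int)} (acc : List (List Int))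
    (h : x ∈ K) : x ∈ dd acc K := by
  induction K generalizing acc with
  | nil => cases h
  | cons k K ih =>
    simp only [dd, List.foldl_cons]
    rcases List.mem_cons.mp h with rfl | hx
    · apply mem_dd_left
      split
      · assumption
      · exact List.mem_append_right _ (by simp)
    · exact ih _ hx

theorem dd_all_mem {acc : List (List Int)} {K : List (List Int)}
    (h : ∀ k ∈ K, k ∈ acc) : dd acc K = acc := by
  induction K with
  | nil => rfl
  | cons k K ih =>
    simp only [dd, List.foldl_cons]
    rw [if_pos (h k (by simp))]
    exact ih (fun k' hk' => h k' (by simp [hk']))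

theorem dd_flatMap {β : Type} (s : List β) (f : β → List (List Int)) (acc : List (List Int)) :
    dd acc (s.flatMap f) = s.foldl (fun p b => dd p (f b)) acc := by
  induction s generalizing acc with
  | nil => rfl
  | cons b s ih => rw [List.flatMap_cons, dd_append, List.foldl_cons, ih]

/-- the (possibly empty) key contributed by one complete tuple -/
def base (tg : Int) (f : List Int) : List (List Int) :=
  if f.sum = tg then [keyOf f] else []

/-- keys produced by A's nested loops: n more coordinates, each ranging over s, after prefix f -/
def KA (tg : Int) (s : List Int) : Nat → List Int → List (List Int)
  | 0, f => base tg f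
  | n + 1, f => s.flatMap (fun b => KA tg s n (f ++ [b]))

/-- keys produced by B: n more coordinates drawn as combinations with replacement from t -/
def KB (tg : Int) (n : Nat) (f : List Int) (t : List Int) : List (List Int) :=
  (pvCwr n t).flatMap (fun c => base tg (f ++ c))

theorem pvCwr_succ_cons (r : Nat) (x : Int) (t : List Int) :
    pvCwr (r + 1) (x :: t) = (pvCwr r (x :: t)).map (x :: ·) ++ pvCwr (r + 1) t := by
  rw [pvCwr]

theorem KB_zero (tg : Int) (f t : List Int) : KB tg 0 f t = base tg f := by
  simp [KB, pvCwr]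

theorem KB_succ_nil (tg : Int) (n : Nat) (f : List Int) : KB tg (n + 1) f [] = [] := by
  rw [KB, pvCwr]
  rfl

theorem KB_succ_cons (tg : Int) (n : Nat) (f : List Int) (y : Int) (t : List Int) :
    KB tg (n + 1) f (y :: t) = KB tg n (f ++ [y]) (y :: t) ++ KB tg (n + 1) f t := by
  rw [KB, pvCwr_succ_cons, List.flatMap_append, List.flatMap_map]
  congr 1
  apply List.flatMap_congr
  intro c _
  simp

theorem mem_KA {tg : Int} {s : List Int} {n : Nat} {f k : List Int} :
    k ∈ KA tg s n f ↔
      ∃ c : List Int, c.length = n ∧ (∀ v ∈ c, v ∈ s) ∧ (f ++ c).sum = tg ∧ k = keyOf (f ++ c) := by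
  induction n generalizing f with
  | zero =>
    simp only [KA, base]
    constructor
    · intro h
      split at h
      · exact ⟨[], by simpa using ⟨by assumption, (List.mem_singleton.mp h)⟩⟩
      · cases h
    · rintro ⟨c, hlen, _, hsum, hk⟩
      rw [List.length_eq_zero_iff.mp hlen] at hsum hk
      simp only [List.append_nil] at hsum hk
      rw [if_pos hsum]
      simp [hk]
  | succ n ih =>
    simp only [KA, List.mem_flatMap]
    constructor
    · rintro ⟨b, hb, hk⟩
      rcases ih.mp hk with ⟨c, hlen, hmem, hsum, hkey⟩
      refine ⟨b :: c, by simp [hlen], ?_, ?_, ?_⟩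
      · intro v hv
        rcases List.mem_cons.mp hv with rfl | hv
        · exact hb
        · exact hmem v hv
      · simpa [List.append_assoc] using hsum
      · simpa [List.append_assoc] using hkey
    · rintro ⟨c, hlen, hmem, hsum, hkey⟩
      rcases c with _ | ⟨b, c⟩
      · simp at hlen
      · refine ⟨b, hmem b (by simp), ih.mpr ⟨c, by simpa using hlen, fun v hv => hmem v (by simp [hv]), ?_, ?_⟩⟩
        · simpa [List.append_assoc] using hsum
        · simpa [List.append_assoc] using hkey

/-- MAIN LEMMA: deduplicating A's product keys and B's combination keys gives the same
    list, provided every key using a value of `pre` (the already-processed prefix of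
    s = pre ++ t) is already in the accumulator. -/
theorem M (tg : Int) : ∀ (n : Nat) (t f pre : List Int) (acc : List (List Int)),
    (∀ c : List Int, c.length = n → (∀ v ∈ c, v ∈ pre ++ t) → (∃ v ∈ c, v ∈ pre) →
      (f ++ c).sum = tg → keyOf (f ++ c) ∈ acc) →
    dd acc (KA tg (pre ++ t) n f) = dd acc (KB tg n f t) := by
  intro n
  induction n with
  | zero => intro t f pre acc _; rw [KB_zero]; rfl
  | succ n ihn =>
    intro t
    induction t with
    | nil =>
      intro f pre acc H
      rw [KB_succ_nil, dd_nil]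
      apply dd_all_mem
      intro k hk
      rcases mem_KA.mp hk with ⟨c, hlen, hmem, hsum, rfl⟩
      rcases c with _ | ⟨v, c⟩
      · simp at hlen
      · exact H (v :: c) hlen hmem ⟨v, by simp, by simpa using hmem v (by simp)⟩ hsum
    | cons y t iht =>
      intro f pre acc H
      have hseq : (pre ++ [y]) ++ t = pre ++ y :: t := by simp
      -- piece 1 (b ∈ pre): every key already in acc
      have h1 : ∀ k ∈ pre.flatMap (fun b => KA tg (pre ++ y :: t) n (f ++ [b])), k ∈ acc := by
        intro k hk
        rcases List.mem_flatMap.mp hk with ⟨b, hb, hkb⟩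
        rcases mem_KA.mp hkb with ⟨c, hlen, hmem, hsum, rfl⟩
        have := H (b :: c) (by simp [hlen])
          (fun v hv => by
            rcases List.mem_cons.mp hv with rfl | hv
            · exact List.mem_append_left _ hb
            · exact hmem v hv)
          ⟨b, by simp, hb⟩ (by simpa [List.append_assoc] using hsum)
        simpa [List.append_assoc] using this
      -- piece 2 (b = y): induction hypothesis on n, with the same split pre / y :: t
      have h2 : dd acc (KA tg (pre ++ y :: t) n (f ++ [y])) =
          dd acc (KB tg n (f ++ [y]) (y :: t)) := by
        exact ihn (y :: t) (f ++ [y]) pre acc (fun c hlen hmem hpre hsum => by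
          have := H (y :: c) (by simp [hlen])
            (fun v hv => by
              rcases List.mem_cons.mp hv with rfl | hv
              · simp
              · exact hmem v hv)
            (by rcases hpre with ⟨v, hv, hvpre⟩; exact ⟨v, by simp [hv], hvpre⟩)
            (by simpa [List.append_assoc] using hsum)
          simpa [List.append_assoc] using this)
      -- the accumulator after the b = y block
      -- every key touching pre ++ [y] is in it: pre-keys were in acc, y-keys are
      -- keys of the b = y block up to a permutation of the tuple
      have Hacc1 : ∀ c : List Int, c.length = n + 1 → (∀ v ∈ c, v ∈ (pre ++ [y]) ++ t) →
          (∃ v ∈ c, v ∈ pre ++ [y]) → (f ++ c).sum = tg →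
          keyOf (f ++ c) ∈ dd acc (KA tg (pre ++ y :: t) n (f ++ [y])) := by
        intro c hlen hmem hpre hsum
        rcases hpre with ⟨v, hv, hvpre⟩
        rcases List.mem_append.mp hvpre with hvp | hvy
        · exact mem_dd_left _ (H c hlen (fun w hw => by rw [← hseq]; exact hmem w hw) ⟨v, hv, hvp⟩ hsum)
        · have hvy' : v = y := by simpa using hvy
          subst hvy'
          rcases List.append_of_mem hv with ⟨u, w, rfl⟩
          apply mem_dd_right
          have hperm : (f ++ (u ++ v :: w)).Perm ((f ++ [v]) ++ (u ++ w)) := by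
            have hmid : (u ++ v :: w).Perm (v :: (u ++ w)) := List.perm_middle
            have : (f ++ (u ++ v :: w)).Perm (f ++ (v :: (u ++ w))) := hmid.append_left f
            simpa using this
          rw [keyOf_perm hperm]
          apply mem_KA.mpr
          refine ⟨u ++ w, ?_, ?_, ?_, rfl⟩
          · simp at hlen ⊢; omega
          · intro x hx
            have hx' : x ∈ u ++ v :: w := by
              rcases List.mem_append.mp hx with h | h
              · exact List.mem_append_left _ h
              · exact List.mem_append_right _ (by simp [h])
            have := hmem x hx'
            rwa [hseq] at this
          · rw [← hperm.sum_eq]; exact hsum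
      -- piece 3 (b ∈ t): inner induction with pre' = pre ++ [y]
      have h3 := iht f (pre ++ [y]) (dd acc (KA tg (pre ++ y :: t) n (f ++ [y])))
        (fun c hlen hmem hpre hsum => Hacc1 c hlen hmem hpre hsum)
      rw [hseq] at h3
      -- split off the pre ++ [y] part of h3's KA, all of whose keys are covered
      have hKA1 : KA tg (pre ++ y :: t) (n + 1) f =
          (pre ++ [y]).flatMap (fun b => KA tg (pre ++ y :: t) n (f ++ [b]))
            ++ t.flatMap (fun b => KA tg (pre ++ y :: t) n (f ++ [b])) := by
        show (pre ++ y :: t).flatMap _ = _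
        rw [← List.flatMap_append, hseq]
      have hcov : dd (dd acc (KA tg (pre ++ y :: t) n (f ++ [y])))
          ((pre ++ [y]).flatMap (fun b => KA tg (pre ++ y :: t) n (f ++ [b])))
          = dd acc (KA tg (pre ++ y :: t) n (f ++ [y])) := by
        apply dd_all_mem
        intro k hk
        rcases List.mem_flatMap.mp hk with ⟨b, hb, hkb⟩
        rcases mem_KA.mp hkb with ⟨c, hlen, hmem, hsum, rfl⟩
        have := Hacc1 (b :: c) (by simp [hlen])
          (fun v hv => by
            rcases List.mem_cons.mp hv with rfl | hv
            · exact List.mem_append_left _ hb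
            · rw [hseq]; exact hmem v hv)
          ⟨b, by simp, hb⟩ (by simpa [List.append_assoc] using hsum)
        simpa [List.append_assoc] using this
      rw [hKA1, dd_append, hcov] at h3
      -- assemble
      have hKA2 : KA tg (pre ++ y :: t) (n + 1) f =
          pre.flatMap (fun b => KA tg (pre ++ y :: t) n (f ++ [b]))
            ++ (KA tg (pre ++ y :: t) n (f ++ [y])
            ++ t.flatMap (fun b => KA tg (pre ++ y :: t) n (f ++ [b]))) := by
        show (pre ++ y :: t).flatMap _ = _
        rw [List.flatMap_append, List.flatMap_cons]
      rw [hKA2, dd_append, dd_append, dd_all_mem h1, KB_succ_cons, dd_append, ← h2, h3]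

/-- A's nested loops, written as a single recursion on the remaining depth -/
def Anest (tg : Int) (s : List Int) : Nat → List Int → List (List Int) → List (List Int)
  | 0, f, p => if f.sum = tg then (if keyOf f ∈ p then p else p ++ [keyOf f]) else p
  | n + 1, f, p => s.foldl (fun p b => Anest tg s n (f ++ [b]) p) p

theorem foldl_ext {α β : Type} (f g : β → α → β) (h : ∀ b a, f b a = g b a) :
    ∀ (l : List α) (i : β), l.foldl f i = l.foldl g i := by
  intro l
  have : f = g := by funext b a; exact h b a
  rw [this]
  intro i; rfl

theorem Anest_eq_dd (tg : Int) (s : List Int) :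
    ∀ (n : Nat) (f : List Int) (p : List (List Int)), Anest tg s n f p = dd p (KA tg s n f) := by
  intro n
  induction n with
  | zero =>
    intro f p
    simp only [Anest, KA, base]
    split <;> simp [dd]
  | succ n ih =>
    intro f p
    show s.foldl (fun p b => Anest tg s n (f ++ [b]) p) p = dd p (s.flatMap fun b => KA tg s n (f ++ [b]))
    rw [dd_flatMap]
    exact foldl_ext _ _ (fun p b => ih (f ++ [b]) p) s p

/-- B's fold over the generated combinations deduplicates their keys -/
theorem B_seen_eq_dd (tg : Int) (K : List (List Int)) :
    darts_solver_alt_seen K tg = dd [] (K.flatMap (base tg)) := by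
  suffices h : ∀ p : List (List Int),
      K.foldl (fun seen combo =>
        if combo.sum = tg then
          if (PySem.List.sorted combo (fun x => x) false) ∈ seen then seen
          else seen ++ [PySem.List.sorted combo (fun x => x) false]
        else seen) p = dd p (K.flatMap (base tg)) by
    exact h []
  induction K with
  | nil => intro p; rfl
  | cons c K ih =>
    intro p
    rw [List.foldl_cons, List.flatMap_cons, dd_append, ih]
    congr 1
    simp only [base, keyOf]
    split <;> simp [dd]

theorem foldl_join_eq_map (g : List Int → String) :
    ∀ (p : List (List Int)) (q : List String),
      p.foldl (fun q i => q ++ [g i]) q = q ++ p.map g := by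
  intro p
  induction p with
  | nil => simp
  | cons i p ih => intro q; rw [List.foldl_cons, List.map_cons, ih]; simp

/-- the two deduplicated key lists agree, for each darts count -/
theorem keys_eq (tg : Int) (s : List Int) (n : Nat) :
    dd [] (KA tg s n []) = dd [] (KB tg n [] s) := by
  have := M tg n s [] [] [] (fun c _ _ hpre _ => by
    rcases hpre with ⟨v, _, hv⟩; cases hv)
  simpa using this

/-- A's first stage equals deduplication of the product keys -/
theorem A_p_eq (tg : Int) (s : List Int) :
    darts_solver_p s 3 tg = dd [] (KA tg s 3 []) ∧
    darts_solver_p s 4 tg = dd [] (KA tg s 4 []) := by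
  constructor
  · show (s.foldl _ []) = _
    rw [← Anest_eq_dd]
    apply foldl_ext
    intro p a
    apply foldl_ext
    intro p b
    apply foldl_ext
    intro p c
    show _ = Anest tg s 0 ([] ++ [a] ++ [b] ++ [c]) p
    simp only [Anest, keyOf]
    have hsum : (([] ++ [a] ++ [b] ++ [c] : List Int)).sum = a + b + c := by simp; ring
    rw [hsum]
    norm_num
  · show (s.foldl _ []) = _
    rw [← Anest_eq_dd]
    apply foldl_ext
    intro p a
    apply foldl_ext
    intro p b
    apply foldl_ext
    intro p c
    apply foldl_ext
    intro p d
    show _ = Anest tg s 0 ([] ++ [a] ++ [b] ++ [c] ++ [d]) p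
    simp only [Anest, keyOf]
    have hsum : (([] ++ [a] ++ [b] ++ [c] ++ [d] : List Int)).sum = a + b + c + d := by simp; ring
    rw [hsum]
    norm_num

-- ===== VERDICT (by name: the statement is the Claim_ definition above) =====
theorem darts_solver_spec : Claim_equal_darts_solver := by
  intro sections darts target _
  show darts_solver sections darts target = darts_solver_alt sections darts target
  unfold darts_solver darts_solver_alt
  by_cases h3 : darts = 3
  · subst h3
    rw [if_pos (Or.inl rfl), if_pos rfl, (A_p_eq target sections).1, foldl_join_eq_map,
        B_seen_eq_dd, keys_eq]
    simp [KB]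
  · by_cases h4 : darts = 4
    · subst h4
      rw [if_pos (Or.inr rfl), if_neg (by norm_num),
          show darts_solver_p sections 4 target = dd [] (KA target sections 4 []) from
            (A_p_eq target sections).2,
          foldl_join_eq_map, B_seen_eq_dd, keys_eq]
      simp [KB]
    · rw [if_neg (by tauto)]
      unfold darts_solver_p
      rw [if_neg h3, if_neg h4]
      rfl
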